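-- pv_equiv track=rewrite | github.com/dancasmor/An-aproach-to-a-spike-based-Content-Addressable-Memory-bio-inspired-in-the-Hippocampus | generate_testbench.py | create_alternate_cue_input_vector
-- ===== SOURCE A (Python) =====
-- def create_alternate_cue_input_vector(cue, binaryCueValues, currentOperationTime, operationTime, holdingTime, numOperations):
--     # Take a list of binary values to assign them to the correct cue neuron in the correct time stamp to do the
--     #  operation adding 2 times the value once for writing and once for reading it
--
--     # Associate each binary value of each cue as an activation of a neuron input
--     for indexCue, inputBinaryCue in enumerate(binaryCueValues):
--         # + For the writing operation
--         for indexValue, binaryValue in enumerate(inputBinaryCue):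
--             # Only put "active" values (1 in binary)
--             if binaryValue == 1:
--                 # Hold the values as time as the operation need
--                 for holdingIndex in range(holdingTime[0]):
--                     cue[indexValue].append(currentOperationTime + holdingIndex)
--         # Add to the current operation time the minimum time to begin the next operation
--         currentOperationTime = currentOperationTime + operationTime[0]
--         numOperations = numOperations + 1
--         # + For the reading operation
--         for indexValue, binaryValue in enumerate(inputBinaryCue):
--             # Only put "active" values (1 in binary)
--             if binaryValue == 1:
--                 # Hold the values as time as the operation need
--                 for holdingIndex in range(holdingTime[1]):
--                     cue[indexValue].append(currentOperationTime + holdingIndex)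
--         currentOperationTime = currentOperationTime + operationTime[1]
--         numOperations = numOperations + 1
--     return cue, numOperations, currentOperationTime
-- ===== SOURCE B (Python) =====
-- def create_alternate_cue_input_vector(cue, binaryCueValues, currentOperationTime, operationTime, holdingTime, numOperations):
--     # Closed-form timestamps, loop inverted: outer over neuron index, inner over cue rows.
--     # Mutates the inner lists of cue in place (same appends as the original).
--     n = len(binaryCueValues)
--     if n == 0:
--         return cue, numOperations, currentOperationTime
--     op0, op1 = operationTime[0], operationTime[1]
--     period = op0 + op1
--     for j, lst in enumerate(cue):
--         for i, row in enumerate(binaryCueValues):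
--             if j < len(row) and row[j] == 1:
--                 w = currentOperationTime + i * period
--                 lst.extend(range(w, w + holdingTime[0]))
--                 lst.extend(range(w + op0, w + op0 + holdingTime[1]))
--     return cue, numOperations + 2 * n, currentOperationTime + n * period
-- ===== Notes on version B (the rewrite author's own statement) =====
-- stated objective: alternative
-- what changed: B replaces A's accumulator-threaded double pass per cue row (mutating currentOperationTime and numOperations step by step) by closed-form timestamps (write time = base + i*(op0+op1), read time = write + op0) with the loop nesting inverted: outer loop over neuron lists, inner loop over cue rows, and the counters computed in one arithmetic step.
import Mathlib
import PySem

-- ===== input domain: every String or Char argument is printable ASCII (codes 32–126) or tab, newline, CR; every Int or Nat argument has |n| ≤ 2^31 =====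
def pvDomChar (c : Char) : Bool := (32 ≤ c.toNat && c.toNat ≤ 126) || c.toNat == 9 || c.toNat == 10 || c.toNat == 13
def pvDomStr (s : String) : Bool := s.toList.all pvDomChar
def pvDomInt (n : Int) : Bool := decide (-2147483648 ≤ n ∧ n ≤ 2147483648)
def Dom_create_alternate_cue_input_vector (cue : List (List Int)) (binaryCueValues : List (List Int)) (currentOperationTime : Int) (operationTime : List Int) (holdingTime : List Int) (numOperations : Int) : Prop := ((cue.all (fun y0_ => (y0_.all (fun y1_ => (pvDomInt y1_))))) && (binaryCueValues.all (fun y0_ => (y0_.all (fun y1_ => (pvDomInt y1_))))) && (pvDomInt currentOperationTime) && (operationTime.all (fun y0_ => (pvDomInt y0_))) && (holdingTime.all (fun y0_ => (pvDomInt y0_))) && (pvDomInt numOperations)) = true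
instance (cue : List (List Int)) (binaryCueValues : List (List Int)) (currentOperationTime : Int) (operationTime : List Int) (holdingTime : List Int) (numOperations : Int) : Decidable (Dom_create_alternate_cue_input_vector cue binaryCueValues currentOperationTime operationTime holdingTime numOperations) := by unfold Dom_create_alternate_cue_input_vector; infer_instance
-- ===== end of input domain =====

-- B computes the write/read timestamps in closed form with the loop nesting inverted (outer over neuron
-- lists, inner over cue rows) instead of threading the time/count accumulators; equivalence is about the
-- RETURN value (Python A mutates the inner lists of `cue` in place; Python B performs the same appends).

-- ===== PORT A =====
-- helpers shared literally by both ports: `pvRng a b` = Python's list(range(a, b)) of ints,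
-- `pvEnum k xs` = enumerate(xs) starting at k
def pvRng (a b : Int) : List Int := (List.range (b - a).toNat).map (fun k => a + (k : Int))

def pvEnum {α : Type} : Nat → List α → List (Nat × α)
  | _, [] => []
  | k, x :: xs => (k, x) :: pvEnum (k + 1) xs

-- cue[j].append-sequence: append a block to the j-th inner list (identity out of range;
-- inside Pre_ an out-of-range j only occurs when the appended block is empty, matching Python A)
def pvAppAt : List (List Int) → Nat → List Int → List (List Int)
  | [], _, _ => []
  | x :: xs, 0, v => (x ++ v) :: xs
  | x :: xs, j + 1, v => x :: pvAppAt xs j v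

-- one `for indexValue, binaryValue in enumerate(inputBinaryCue)` pass of A; the inner
-- `for holdingIndex in range(h)` append loop is the block pvRng t (t+h)
def pvPassA (cue : List (List Int)) (row : List Int) (t h : Int) : List (List Int) :=
  (pvEnum 0 row).foldl
    (fun c jv => if jv.2 = 1 then pvAppAt c jv.1 (pvRng t (t + h)) else c) cue

-- holdingTime[0] etc. are read with getD 0; inside Pre_ every such access is in range, as in Python A
def create_alternate_cue_input_vector (cue : List (List Int)) (binaryCueValues : List (List Int)) (currentOperationTime : Int) (operationTime : List Int) (holdingTime : List Int) (numOperations : Int) : List (List Int) × Int × Int :=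
  let st := binaryCueValues.foldl
    (fun (st : List (List Int) × Int × Int) row =>
      let c1 := pvPassA st.1 row st.2.1 (holdingTime.getD 0 0)
      let t1 := st.2.1 + operationTime.getD 0 0
      let c2 := pvPassA c1 row t1 (holdingTime.getD 1 0)
      (c2, t1 + operationTime.getD 1 0, st.2.2 + 1 + 1))
    (cue, currentOperationTime, numOperations)
  (st.1, st.2.2, st.2.1)

-- ===== PORT B =====
-- inner loop of B for one neuron list `l` at index j: scan the cue rows, appending the
-- write block then the read block at the closed-form times w = t + i*period, w + op0
def pvScanRowsB (bcv : List (List Int)) (j : Nat) (l : List Int) (t op0 period h0 h1 : Int) : List Int :=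
  (pvEnum 0 bcv).foldl
    (fun l ir =>
      if j < ir.2.length ∧ ir.2.getD j 0 = 1 then
        let w := t + (ir.1 : Int) * period
        l ++ pvRng w (w + h0) ++ pvRng (w + op0) (w + op0 + h1)
      else l) l

def create_alternate_cue_input_vector_alt (cue : List (List Int)) (binaryCueValues : List (List Int)) (currentOperationTime : Int) (operationTime : List Int) (holdingTime : List Int) (numOperations : Int) : List (List Int) × Int × Int :=
  if binaryCueValues.length = 0 then (cue, numOperations, currentOperationTime)
  else
    let op0 := operationTime.getD 0 0
    let op1 := operationTime.getD 1 0
    let period := op0 + op1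
    let h0 := holdingTime.getD 0 0
    let h1 := holdingTime.getD 1 0
    ((pvEnum 0 cue).map (fun jl =>
        pvScanRowsB binaryCueValues jl.1 jl.2 currentOperationTime op0 period h0 h1),
     numOperations + 2 * binaryCueValues.length,
     currentOperationTime + (binaryCueValues.length : Int) * period)

-- ===== PRECONDITION & SPEC =====
-- Pre_ excludes exactly the inputs where Python A raises: IndexError on operationTime[0]/[1] (any cue row),
-- on holdingTime[0]/[1] (some row contains a 1), or on cue[indexValue] (a 1 at a position ≥ len(cue)
-- while the corresponding holding time is positive so the append is actually reached).
def Pre_create_alternate_cue_input_vector (cue : List (List Int)) (binaryCueValues : List (List Int)) (currentOperationTime : Int) (operationTime : List Int) (holdingTime : List Int) (numOperations : Int) : Prop :=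
  (binaryCueValues ≠ [] → 2 ≤ operationTime.length) ∧
  ((∃ r ∈ binaryCueValues, (1 : Int) ∈ r) → 2 ≤ holdingTime.length) ∧
  ((0 < holdingTime.getD 0 0 ∨ 0 < holdingTime.getD 1 0) →
    ∀ r ∈ binaryCueValues, ∀ j, j < r.length → r.getD j 0 = 1 → j < cue.length)
instance (cue : List (List Int)) (binaryCueValues : List (List Int)) (currentOperationTime : Int) (operationTime : List Int) (holdingTime : List Int) (numOperations : Int) : Decidable (Pre_create_alternate_cue_input_vector cue binaryCueValues currentOperationTime operationTime holdingTime numOperations) := by unfold Pre_create_alternate_cue_input_vector; infer_instance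

def pvWitness_create_alternate_cue_input_vector : List (List Int) × List (List Int) × Int × List Int × List Int × Int :=
  ([[0], []], [[1, 0], [0, 1]], 0, [10, 20], [2, 3], 0)

def Spec_create_alternate_cue_input_vector (cue : List (List Int)) (binaryCueValues : List (List Int)) (currentOperationTime : Int) (operationTime : List Int) (holdingTime : List Int) (numOperations : Int) (out : List (List Int) × Int × Int) : Prop := out = create_alternate_cue_input_vector_alt cue binaryCueValues currentOperationTime operationTime holdingTime numOperations
instance (cue : List (List Int)) (binaryCueValues : List (List Int)) (currentOperationTime : Int) (operationTime : List Int) (holdingTime : List Int) (numOperations : Int) (out : List (List Int) × Int × Int) : Decidable (Spec_create_alternate_cue_input_vector cue binaryCueValues currentOperationTime operationTime holdingTime numOperations out) := by unfold Spec_create_alternate_cue_input_vector; infer_instance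

-- ===== CLAIM (what is proved, stated in full; the proofs are below) =====
def Claim_equal_create_alternate_cue_input_vector : Prop := ∀ (cue : List (List Int)) (binaryCueValues : List (List Int)) (currentOperationTime : Int) (operationTime : List Int) (holdingTime : List Int) (numOperations : Int), Dom_create_alternate_cue_input_vector cue binaryCueValues currentOperationTime operationTime holdingTime numOperations → Pre_create_alternate_cue_input_vector cue binaryCueValues currentOperationTime operationTime holdingTime numOperations → Spec_create_alternate_cue_input_vector cue binaryCueValues currentOperationTime operationTime holdingTime numOperations (create_alternate_cue_input_vector cue binaryCueValues currentOperationTime operationTime holdingTime numOperations)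

-- ===== LEMMAS AND PROOFS =====

-- proof-only reformulations ------------------------------------------------

-- elementwise effect of one enumerate pass of A (cue zipped with the bit row)
def pvZipW : List (List Int) → List Int → Int → Int → List (List Int)
  | c, [], _, _ => c
  | [], _ :: _, _, _ => []
  | x :: xs, v :: vs, t, h => (if v = 1 then x ++ pvRng t (t + h) else x) :: pvZipW xs vs t h

-- total contribution of a list of cue rows to neuron j, base time t
def pvBc (op0 period h0 h1 : Int) : List (List Int) → Nat → Int → List Int
  | [], _, _ => []
  | r :: rs, j, t =>
      (if j < r.length ∧ r.getD j 0 = 1 then pvRng t (t + h0) ++ pvRng (t + op0) (t + op0 + h1) else []) ++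
      pvBc op0 period h0 h1 rs j (t + period)

-- A's cue evolution, time threaded
def pvAC (op0 op1 h0 h1 : Int) : List (List Int) → List (List Int) → Int → List (List Int)
  | [], c, _ => c
  | r :: rs, c, t => pvAC op0 op1 h0 h1 rs (pvZipW (pvZipW c r t h0) r (t + op0) h1) (t + op0 + op1)

theorem pvAppAt_out (c : List (List Int)) (k : Nat) (v : List Int) (h : c.length ≤ k) :
    pvAppAt c k v = c := by
  induction c generalizing k with
  | nil => rfl
  | cons x xs ih =>
    cases k with
    | zero => simp at h
    | succ k => simp [pvAppAt, ih k (by simpa using h)]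

theorem pvAppAt_append (pre : List (List Int)) (x : List Int) (xs : List (List Int)) (v : List Int) :
    pvAppAt (pre ++ x :: xs) pre.length v = pre ++ (x ++ v) :: xs := by
  induction pre with
  | nil => rfl
  | cons p ps ih => simp [pvAppAt, ih]

theorem pvPass_noop (row : List Int) (c : List (List Int)) (t h : Int) (k : Nat) (hk : c.length ≤ k) :
    (pvEnum k row).foldl (fun c jv => if jv.2 = 1 then pvAppAt c jv.1 (pvRng t (t + h)) else c) c = c := by
  induction row generalizing k with
  | nil => rfl
  | cons v vs ih =>
    simp only [pvEnum, List.foldl_cons]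
    split
    · rw [pvAppAt_out c k _ hk]; exact ih (k + 1) (by omega)
    · exact ih (k + 1) (by omega)

theorem pvPass_enum (row : List Int) (pre rest : List (List Int)) (t h : Int) :
    (pvEnum pre.length row).foldl (fun c jv => if jv.2 = 1 then pvAppAt c jv.1 (pvRng t (t + h)) else c) (pre ++ rest)
      = pre ++ pvZipW rest row t h := by
  induction row generalizing pre rest with
  | nil => cases rest <;> rfl
  | cons v vs ih =>
    cases rest with
    | nil =>
      simp only [pvZipW, List.append_nil] at *
      exact pvPass_noop (v :: vs) pre t h pre.length le_rfl
    | cons x xs =>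
      simp only [pvEnum, List.foldl_cons, pvZipW]
      by_cases hv : v = 1
      · rw [if_pos hv, pvAppAt_append]
        have := ih (pre ++ [x ++ pvRng t (t + h)]) xs
        simpa [hv, List.append_assoc] using this
      · rw [if_neg hv]
        have := ih (pre ++ [x]) xs
        simpa [hv, List.append_assoc] using this

theorem pvPassA_eq (cue : List (List Int)) (row : List Int) (t h : Int) :
    pvPassA cue row t h = pvZipW cue row t h := by
  simpa using pvPass_enum row [] cue t h

theorem pvZipW_getElem? (cs : List (List Int)) (row : List Int) (t h : Int) (j : Nat) :
    (pvZipW cs row t h)[j]? =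
      (cs[j]?).map (fun x => if j < row.length ∧ row.getD j 0 = 1 then x ++ pvRng t (t + h) else x) := by
  induction cs generalizing row j with
  | nil => cases row <;> simp [pvZipW]
  | cons x xs ih =>
    cases row with
    | nil => simp [pvZipW]
    | cons v vs =>
      cases j with
      | zero => simp [pvZipW]
      | succ j => simpa [pvZipW] using ih vs j

theorem pvAC_getElem? (op0 op1 h0 h1 : Int) (rs : List (List Int)) (cs : List (List Int)) (t : Int) (j : Nat) :
    (pvAC op0 op1 h0 h1 rs cs t)[j]? =
      (cs[j]?).map (fun x => x ++ pvBc op0 (op0 + op1) h0 h1 rs j t) := by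
  induction rs generalizing cs t with
  | nil => simp [pvAC, pvBc]
  | cons r rest ih =>
    simp only [pvAC, pvBc, ih, pvZipW_getElem?, Option.map_map]
    cases hcs : cs[j]? with
    | none => rfl
    | some x =>
      simp only [Option.map_some, Option.some.injEq, Function.comp]
      split <;> simp [List.append_assoc, add_assoc]

-- A's foldl in closed form
theorem pvA_eq (bcv : List (List Int)) (cue : List (List Int)) (t n : Int)
    (operationTime holdingTime : List Int) :
    (bcv.foldl
      (fun (st : List (List Int) × Int × Int) row =>
        let c1 := pvPassA st.1 row st.2.1 (holdingTime.getD 0 0)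
        let t1 := st.2.1 + operationTime.getD 0 0
        let c2 := pvPassA c1 row t1 (holdingTime.getD 1 0)
        (c2, t1 + operationTime.getD 1 0, st.2.2 + 1 + 1))
      (cue, t, n))
    = (pvAC (operationTime.getD 0 0) (operationTime.getD 1 0) (holdingTime.getD 0 0) (holdingTime.getD 1 0) bcv cue t,
       t + (bcv.length : Int) * (operationTime.getD 0 0 + operationTime.getD 1 0),
       n + 2 * (bcv.length : Int)) := by
  induction bcv generalizing cue t n with
  | nil => simp [pvAC]
  | cons r rs ih =>
    rw [List.foldl_cons, ih]
    simp only [pvPassA_eq, pvAC, List.length_cons, Prod.mk.injEq]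
    and_intros <;> first | trivial | (push_cast; ring)

-- B's inner fold in closed form
theorem pvScan_enum (bcv : List (List Int)) (j : Nat) (l : List Int) (t op0 period h0 h1 : Int) (k : Nat) :
    (pvEnum k bcv).foldl
      (fun l ir =>
        if j < ir.2.length ∧ ir.2.getD j 0 = 1 then
          let w := t + (ir.1 : Int) * period
          l ++ pvRng w (w + h0) ++ pvRng (w + op0) (w + op0 + h1)
        else l) l
    = l ++ pvBc op0 period h0 h1 bcv j (t + (k : Int) * period) := by
  induction bcv generalizing k l with
  | nil => simp [pvBc, pvEnum]
  | cons r rs ih =>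
    simp only [pvEnum, List.foldl_cons, pvBc]
    have harith : t + (k : Int) * period + period = t + ((k + 1 : Nat) : Int) * period := by push_cast; ring
    split
    · rw [ih _ (k + 1), harith]; simp [List.append_assoc]
    · rw [ih _ (k + 1), harith]; simp

theorem pvScanRowsB_eq (bcv : List (List Int)) (j : Nat) (l : List Int) (t op0 period h0 h1 : Int) :
    pvScanRowsB bcv j l t op0 period h0 h1 = l ++ pvBc op0 period h0 h1 bcv j t := by
  simpa [pvScanRowsB, List.append_assoc] using pvScan_enum bcv j l t op0 period h0 h1 0

theorem pvEnumMap_getElem? {α β : Type} (l : List α) (f : Nat × α → β) (k j : Nat) :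
    ((pvEnum k l).map f)[j]? = (l[j]?).map (fun x => f (k + j, x)) := by
  induction l generalizing k j with
  | nil => simp [pvEnum]
  | cons x xs ih =>
    cases j with
    | zero => simp [pvEnum]
    | succ j =>
      have harith : k + (j + 1) = (k + 1) + j := by omega
      rw [harith]
      simpa [pvEnum] using ih (k + 1) j


-- ===== VERDICT (by name: the statement is the Claim_ definition above) =====
theorem create_alternate_cue_input_vector_spec : Claim_equal_create_alternate_cue_input_vector := by
  intro cue bcv t op ht n _hdom _hpre
  unfold Spec_create_alternate_cue_input_vector
  unfold create_alternate_cue_input_vector create_alternate_cue_input_vector_alt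
  rw [pvA_eq]
  by_cases hb : bcv.length = 0
  · rcases List.length_eq_zero_iff.mp hb with rfl
    simp [pvAC]
  · rw [if_neg hb]
    refine Prod.ext ?_ rfl
    apply List.ext_getElem?
    intro j
    rw [pvAC_getElem?, pvEnumMap_getElem?]
    cases cue[j]? with
    | none => rfl
    | some x => simp [pvScanRowsB_eq]
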